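-- pv_equiv track=rewrite | github.com/bmvicente/moremaroon | models/indexcoop/cbETI.py | rebalance
-- ===== SOURCE A (Python) =====
-- def compute_usdc_percentage(TI):
--     if TI == -1:
--         return 1
--     elif TI == 1:
--         return 0
--     else:
--         return 0.5
--
-- def rebalance(TI_values):
--     usdc_values = [compute_usdc_percentage(TI_values[0])]  # Start with the first day's %USDC value
--     rebalance_flags = [False]  # Start with "FALSE" for the first day
--
--     for i in range(1, len(TI_values)):
--         current_usdc = compute_usdc_percentage(TI_values[i])
--         usdc_values.append(current_usdc)
--
--         if current_usdc != usdc_values[i-1]: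
--             rebalance_flags.append(True)
--         else:
--             rebalance_flags.append(False)
--
--     return rebalance_flags
-- ===== SOURCE B (Python) =====
-- def rebalance(TI_values):
--     # Run-length encode the regime (-1 / 1 / other); a rebalance happens exactly
--     # at the start of every run after the first, so flags are expanded from run lengths.
--     runs = []
--     prev = None
--     for t in TI_values:
--         k = t if t in (-1, 1) else 0
--         if runs and k == prev:
--             runs[-1] += 1
--         else:
--             runs.append(1)
--         prev = k
--     flags = [False] * runs[0]
--     for r in runs[1:]:
--         flags += [True] + [False] * (r - 1)
--     return flags
-- ===== Notes on version B (the rewrite author's own statement) =====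
-- stated objective: alternative
-- what changed: B run-length-encodes the regime (-1 / 1 / other, which determines the USDC percentage) in one pass and then expands the run lengths into flags ([False]*first_run then [True]+[False]*(r-1) per later run), instead of A's fused loop that appends each computed percentage and compares it against usdc_values[i-1].
import Mathlib
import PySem

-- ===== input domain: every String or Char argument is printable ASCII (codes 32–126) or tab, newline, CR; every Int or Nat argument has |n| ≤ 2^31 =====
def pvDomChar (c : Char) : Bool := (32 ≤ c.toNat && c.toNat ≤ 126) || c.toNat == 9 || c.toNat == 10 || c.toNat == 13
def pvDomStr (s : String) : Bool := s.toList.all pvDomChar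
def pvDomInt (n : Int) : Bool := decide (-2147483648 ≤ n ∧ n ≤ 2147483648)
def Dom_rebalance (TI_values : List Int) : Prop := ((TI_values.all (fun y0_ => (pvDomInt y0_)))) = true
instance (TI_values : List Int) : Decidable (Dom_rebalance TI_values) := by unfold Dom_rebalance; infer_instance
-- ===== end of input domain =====

-- B run-length-encodes the regime (-1/1/other) and expands run lengths into flags, instead of
-- A's fused loop comparing each computed percentage with the previous one; objective: alternative.

-- ===== PORT A =====
def computeUsdcPercentage (TI : Int) : Rat :=
  if TI = -1 then 1 else if TI = 1 then 0 else 1/2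

-- one iteration of A's `for i in range(1, len(TI_values))` (state = (usdc_values, rebalance_flags));
-- in-range indexing TI_values[i] / usdc_values[i-1] is ported with pyGetD (exact under Pre_).
def rebalanceStep (TI_values : List Int) (st : List Rat × List Bool) (i : Int) :
    List Rat × List Bool :=
  let current := computeUsdcPercentage (PySem.List.pyGetD TI_values i 0)
  let usdc := st.1 ++ [current]
  (usdc, st.2 ++ [decide (current ≠ PySem.List.pyGetD usdc (i - 1) 0)])

def rebalance (TI_values : List Int) : List Bool :=
  ((PySem.List.pyRange 1 (TI_values.length : Int) 1).foldl (rebalanceStep TI_values)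
    ([computeUsdcPercentage (PySem.List.pyGetD TI_values 0 0)], [false])).2

-- ===== PORT B =====
-- `t if t in (-1, 1) else 0`
def regimeKey (t : Int) : Int := if t = -1 ∨ t = 1 then t else 0

-- `runs[-1] += 1`
def incLast : List Int → List Int
  | [] => []
  | [x] => [x + 1]
  | x :: xs => x :: incLast xs

-- one iteration of B's first loop (state = (runs, prev)); `if runs and k == prev`
def runStep (st : List Int × Option Int) (t : Int) : List Int × Option Int :=
  let k := regimeKey t
  if st.1 ≠ [] ∧ some k = st.2 then (incLast st.1, some k) else (st.1 ++ [1], some k)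

def rebalance_alt (TI_values : List Int) : List Bool :=
  let runs := (TI_values.foldl runStep ([], none)).1
  let flags := List.replicate (PySem.List.pyGetD runs 0 0).toNat false
  (PySem.List.slice runs (some 1) none).foldl
    (fun acc r => acc ++ true :: List.replicate (r - 1).toNat false) flags

-- ===== PRECONDITION & SPEC =====
-- Pre_ excludes only the empty list, on which both Pythons raise IndexError.
def Pre_rebalance (TI_values : List Int) : Prop := TI_values ≠ []
instance (TI_values : List Int) : Decidable (Pre_rebalance TI_values) := by
  unfold Pre_rebalance; infer_instance
def pvWitness_rebalance : List Int := ([-1, 0, 1, 1, 2])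

def Spec_rebalance (TI_values : List Int) (out : List Bool) : Prop := out = rebalance_alt TI_values
instance (TI_values : List Int) (out : List Bool) : Decidable (Spec_rebalance TI_values out) := by
  unfold Spec_rebalance; infer_instance

-- ===== CLAIM (what is proved, stated in full; the proofs are below) =====
def Claim_equal_rebalance : Prop := ∀ (TI_values : List Int), Dom_rebalance TI_values → Pre_rebalance TI_values → Spec_rebalance TI_values (rebalance TI_values)

-- ===== LEMMAS AND PROOFS =====

-- flags of adjacent changes (proof-side common characterisation of both programs)
def adjFlags : List Int → List Bool
  | [] => []
  | [_] => []
  | a :: b :: t => decide (b ≠ a) :: adjFlags (b :: t)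

-- same, over the percentage list (A's view)
def adjFlagsR : List Rat → List Bool
  | [] => []
  | [_] => []
  | a :: b :: t => decide (b ≠ a) :: adjFlagsR (b :: t)

def flagsA (xs : List Int) : List Bool := false :: adjFlagsR (xs.map computeUsdcPercentage)
def flagsK (xs : List Int) : List Bool := false :: adjFlags (xs.map regimeKey)

-- closed form of B's second phase
def expandRuns (runs : List Int) : List Bool :=
  List.replicate runs.headI.toNat false ++
    runs.tail.flatMap (fun r => true :: List.replicate (r - 1).toNat false)

lemma adjR_snoc (qs : List Rat) (z : Rat) (h : qs ≠ []) :
    adjFlagsR (qs ++ [z]) = adjFlagsR qs ++ [decide (z ≠ qs.getLast h)] := by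
  induction qs with
  | nil => simp at h
  | cons q qs ih =>
    cases qs with
    | nil => simp [adjFlagsR]
    | cons q' qs' =>
      simp only [List.cons_append, adjFlagsR]
      have hih := ih (by simp)
      simp only [List.cons_append] at hih
      rw [hih]
      simp [List.getLast_cons]

lemma adj_snoc (qs : List Int) (z : Int) (h : qs ≠ []) :
    adjFlags (qs ++ [z]) = adjFlags qs ++ [decide (z ≠ qs.getLast h)] := by
  induction qs with
  | nil => simp at h
  | cons q qs ih =>
    cases qs with
    | nil => simp [adjFlags]
    | cons q' qs' =>
      simp only [List.cons_append, adjFlags]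
      have hih := ih (by simp)
      simp only [List.cons_append] at hih
      rw [hih]
      simp [List.getLast_cons]

-- the percentage determines and is determined by the regime key
lemma perc_eq_iff (a b : Int) :
    computeUsdcPercentage a = computeUsdcPercentage b ↔ regimeKey a = regimeKey b := by
  unfold computeUsdcPercentage regimeKey
  split_ifs <;> simp_all

lemma adj_perc_key (xs : List Int) :
    adjFlagsR (xs.map computeUsdcPercentage) = adjFlags (xs.map regimeKey) := by
  induction xs with
  | nil => simp [adjFlags, adjFlagsR]
  | cons a xs ih =>
    cases xs with
    | nil => simp [adjFlags, adjFlagsR]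
    | cons b t =>
      simp only [List.map_cons, adjFlags, adjFlagsR] at *
      rw [ih]
      congr 1
      by_cases h : computeUsdcPercentage b = computeUsdcPercentage a
      · simp [h, (perc_eq_iff b a).mp h]
      · have := (not_iff_not.mpr (perc_eq_iff b a)).mp h
        simp [h, this]

-- ===== A-side: loop invariant =====
lemma loop_inv (xs : List Int) (a : Nat) (h1 : 1 ≤ a) (h2 : a ≤ xs.length) :
    (PySem.List.pyRange (a : Int) (xs.length : Int) 1).foldl (rebalanceStep xs)
      ((xs.take a).map computeUsdcPercentage, flagsA (xs.take a))
    = (xs.map computeUsdcPercentage, flagsA xs) := by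
  by_cases hend : a = xs.length
  · subst hend
    rw [PySem.List.pyRange_one_eq_nil (le_refl _)]
    simp
  · have hlt : a < xs.length := lt_of_le_of_ne h2 hend
    rw [PySem.List.pyRange_one_cons (by exact_mod_cast hlt)]
    have hstep : rebalanceStep xs
        ((xs.take a).map computeUsdcPercentage, flagsA (xs.take a)) (a : Int)
        = ((xs.take (a + 1)).map computeUsdcPercentage, flagsA (xs.take (a + 1))) := by
      have hget : PySem.List.pyGetD xs (a : Int) 0 = xs[a] := by
        simp [PySem.List.pyGetD_natCast, List.getD_eq_getElem?_getD, hlt]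
      have htake : xs.take (a + 1) = xs.take a ++ [xs[a]] := by
        rw [List.take_add_one]; simp [hlt]
      have htne : xs.take a ≠ [] := by
        intro hc
        have := congrArg List.length hc
        simp [min_eq_left (le_of_lt hlt)] at this
        omega
      unfold rebalanceStep flagsA
      simp only [hget]
      simp only [Prod.mk.injEq]
      constructor
      · simp only [htake, List.map_append]; simp
      · rw [htake]
        simp only [List.map_append, List.map_cons, List.map_nil]
        rw [adjR_snoc _ _ (by simpa using htne)]
        rw [List.cons_append]
        congr 3
        have hidx : (a : Int) - 1 = ((a - 1 : Nat) : Int) := by omega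
        rw [hidx, PySem.List.pyGetD_natCast]
        have hlen : ((xs.take a).map computeUsdcPercentage).length = a := by
          simp [min_eq_left (le_of_lt hlt)]
        rw [List.getD_append _ _ _ _ (by omega)]
        rw [List.getLast_eq_getElem]
        rw [List.getD_eq_getElem?_getD, List.getElem?_eq_getElem (by omega)]
        have hmin : min a xs.length - 1 = a - 1 := by omega
        simp [hmin]
    rw [List.foldl_cons, hstep]
    have := loop_inv xs (a + 1) (by omega) (by omega)
    convert this using 3
termination_by xs.length - a

lemma A_eq_flagsA (xs : List Int) (h : xs ≠ []) : rebalance xs = flagsA xs := by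
  unfold rebalance
  have h1 : 1 ≤ xs.length := by cases xs with | nil => exact absurd rfl h | cons _ _ => simp
  have init1 : [computeUsdcPercentage (PySem.List.pyGetD xs 0 0)]
      = (xs.take 1).map computeUsdcPercentage := by
    cases xs with
    | nil => exact absurd rfl h
    | cons x t => simp [PySem.List.pyGetD_zero_cons]
  have init2 : ([false] : List Bool) = flagsA (xs.take 1) := by
    cases xs with
    | nil => exact absurd rfl h
    | cons x t => simp [flagsA, adjFlagsR]
  rw [init1, init2]
  have hloop := congrArg Prod.snd (loop_inv xs 1 (le_refl _) h1)
  simpa using hloop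

-- ===== B-side =====

lemma incLast_ne_nil (l : List Int) (h : l ≠ []) : incLast l ≠ [] := by
  cases l with
  | nil => exact absurd rfl h
  | cons x xs => cases xs <;> simp [incLast]

lemma incLast_pos (l : List Int) (h : ∀ r ∈ l, 1 ≤ r) : ∀ r ∈ incLast l, 1 ≤ r := by
  induction l with
  | nil => simp [incLast]
  | cons x xs ih =>
    cases xs with
    | nil =>
      intro r hr
      simp [incLast] at hr
      have := h x (by simp)
      omega
    | cons y t =>
      intro r hr
      simp only [incLast, List.mem_cons] at hr
      rcases hr with rfl | hr
      · exact h r (by simp)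
      · exact ih (fun r hr => h r (by simp [hr])) r hr

lemma flatMap_incLast (l : List Int) (h : l ≠ []) (hp : ∀ r ∈ l, 1 ≤ r) :
    (incLast l).flatMap (fun r => true :: List.replicate (r - 1).toNat false)
      = l.flatMap (fun r => true :: List.replicate (r - 1).toNat false) ++ [false] := by
  induction l with
  | nil => exact absurd rfl h
  | cons x xs ih =>
    cases xs with
    | nil =>
      have hx : 1 ≤ x := hp x (by simp)
      simp only [incLast, List.flatMap_cons, List.flatMap_nil, List.append_nil,
        List.cons_append, List.cons.injEq, true_and]
      have e3 : (x + 1 - 1).toNat = (x - 1).toNat + 1 := by omega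
      rw [e3, List.replicate_succ']
    | cons y t =>
      have hih := ih (by simp) (fun r hr => hp r (by simp [hr]))
      simp only [incLast, List.flatMap_cons] at *
      rw [hih]
      simp

lemma expand_incLast (l : List Int) (h : l ≠ []) (hp : ∀ r ∈ l, 1 ≤ r) :
    expandRuns (incLast l) = expandRuns l ++ [false] := by
  cases l with
  | nil => exact absurd rfl h
  | cons x xs =>
    cases xs with
    | nil =>
      have hx : 1 ≤ x := hp x (by simp)
      have : (x + 1).toNat = x.toNat + 1 := by omega
      simp [expandRuns, incLast, this, List.replicate_succ']
    | cons y t =>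
      have hflat := flatMap_incLast (y :: t) (by simp) (fun r hr => hp r (by simp [hr]))
      simp only [expandRuns, incLast, List.headI, List.tail_cons]
      rw [hflat]
      simp

lemma expand_snoc_one (l : List Int) (h : l ≠ []) :
    expandRuns (l ++ [1]) = expandRuns l ++ [true] := by
  cases l with
  | nil => exact absurd rfl h
  | cons x xs =>
    simp [expandRuns, List.flatMap_append]

lemma flagsK_snoc (xs : List Int) (t : Int) (h : xs ≠ []) :
    flagsK (xs ++ [t]) = flagsK xs ++ [decide (regimeKey t ≠ regimeKey (xs.getLast h))] := by
  unfold flagsK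
  rw [List.map_append, List.map_cons, List.map_nil,
    adj_snoc _ _ (by simpa using h)]
  rw [List.cons_append]
  congr 3
  rw [List.getLast_map]

-- invariant of B's first loop: after a nonempty prefix, the state is the run-length
-- encoding of that prefix's regimes, with `prev` = last regime key
lemma run_inv (xs : List Int) (h : xs ≠ []) :
    ∃ runs, xs.foldl runStep ([], none) = (runs, some (regimeKey (xs.getLast h))) ∧
      runs ≠ [] ∧ (∀ r ∈ runs, 1 ≤ r) ∧ expandRuns runs = flagsK xs := by
  induction xs using List.reverseRecOn with
  | nil => exact absurd rfl h
  | append_singleton xs t ih =>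
    rcases eq_or_ne xs ([] : List Int) with rfl | hne
    · refine ⟨[1], ?_, by simp, by simp, ?_⟩
      · simp [runStep]
      · simp [expandRuns, flagsK, adjFlags]
    · obtain ⟨runs, hst, hrne, hpos, hexp⟩ := ih hne
      rw [List.foldl_append, hst]
      have hlast : (xs ++ [t]).getLast (by simp) = t := by simp
      by_cases hk : regimeKey t = regimeKey (xs.getLast hne)
      · refine ⟨incLast runs, ?_, incLast_ne_nil runs hrne, incLast_pos runs hpos, ?_⟩
        · simp only [runStep, List.foldl_cons, List.foldl_nil]
          rw [if_pos ⟨hrne, by rw [hk]⟩]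
          rw [hlast]
        · rw [expand_incLast runs hrne hpos, hexp, flagsK_snoc xs t hne]
          simp [hk]
      · refine ⟨runs ++ [1], ?_, by simp, ?_, ?_⟩
        · simp only [runStep, List.foldl_cons, List.foldl_nil]
          rw [if_neg (by rintro ⟨-, hc⟩; exact hk (Option.some_injective _ hc))]
          rw [hlast]
        · intro r hr
          rcases List.mem_append.mp hr with hr | hr
          · exact hpos r hr
          · simp at hr; omega
        · rw [expand_snoc_one runs hrne, hexp, flagsK_snoc xs t hne]
          simp [hk]

lemma B_eq_flagsK (xs : List Int) (h : xs ≠ []) : rebalance_alt xs = flagsK xs := by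
  obtain ⟨runs, hst, hrne, _, hexp⟩ := run_inv xs h
  unfold rebalance_alt
  rw [hst]
  simp only
  rw [PySem.List.slice_from_one, PySem.List.foldl_append_eq_flatMap]
  rw [← hexp]
  cases runs with
  | nil => exact absurd rfl hrne
  | cons x t => simp [expandRuns, PySem.List.pyGetD_zero_cons]

-- ===== VERDICT (by name: the statement is the Claim_ definition above) =====
theorem rebalance_spec : Claim_equal_rebalance := by
  intro xs _ hpre
  unfold Spec_rebalance
  rw [A_eq_flagsA xs hpre, B_eq_flagsK xs hpre]
  unfold flagsA flagsK
  rw [adj_perc_key]
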